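-- pv_equiv track=rewrite | github.com/rajobasu/H4G-Githubscraper | main.py | has_valid_extension
-- ===== SOURCE A (Python) =====
-- valid_extensions = {".java": "java",
--                     ".js": "javascript",
--                     ".php": "PHP",
--                     ".py": "python",
--                     ".vbs": "VBScript",
--                     ".cpp": "C++",
--                     ".c": "C",
--                     ".css": "HTML/CSS",
--                     ".html": "HTML/CSS",
--                     ".rb": "Ruby",
--                     ".swift": "Swift",
--                     ".kt": "Kotlin"}
--
-- def has_valid_extension(path):
--     if "." not in path:
--         return True
--     else:
--         for ext in valid_extensions:
--             if path.endswith(ext):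
--                 return True
--
--     return False
-- ===== SOURCE B (Python) =====
-- _ext_names = {"java", "js", "php", "py", "vbs", "cpp", "c", "css",
--               "html", "rb", "swift", "kt"}
--
-- def has_valid_extension(path):
--     acc = ""
--     for c in reversed(path):
--         if c == ".":
--             return acc in _ext_names
--         acc = c + acc
--     return True
-- ===== Notes on version B (the rewrite author's own statement) =====
-- stated objective: alternative
-- what changed: Replaces the endswith-loop over all dotted extension keys by a single backward scan with an accumulator that finds the last dot (and doubles as the no-dot guard), followed by one set-membership test on the bare suffix.
import Mathlib
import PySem

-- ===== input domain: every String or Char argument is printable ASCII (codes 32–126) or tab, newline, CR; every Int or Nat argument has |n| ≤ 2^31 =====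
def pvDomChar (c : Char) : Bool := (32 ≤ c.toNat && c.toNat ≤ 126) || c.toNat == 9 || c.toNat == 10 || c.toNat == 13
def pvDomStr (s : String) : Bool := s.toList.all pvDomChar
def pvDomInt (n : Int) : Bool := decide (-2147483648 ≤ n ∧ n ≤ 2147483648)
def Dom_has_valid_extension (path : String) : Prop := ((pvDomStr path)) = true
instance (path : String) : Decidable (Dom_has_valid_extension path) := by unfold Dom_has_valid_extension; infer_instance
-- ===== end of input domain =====

-- B replaces A's "." substring test plus endswith-loop over the dotted keys by one
-- backward scan with an accumulator that finds the last dot (no dot found = True)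
-- and a single set-membership test of the bare suffix; objective: alternative.

-- ===== PORT A =====
def validExtensions : PySem.Dict String String := PySem.Dict.ofList
  [(".java", "java"), (".js", "javascript"), (".php", "PHP"), (".py", "python"),
   (".vbs", "VBScript"), (".cpp", "C++"), (".c", "C"), (".css", "HTML/CSS"),
   (".html", "HTML/CSS"), (".rb", "Ruby"), (".swift", "Swift"), (".kt", "Kotlin")]

def has_valid_extension (path : String) : Bool :=
  if ¬ (PySem.Str.isIn "." path = true) then true
  else (validExtensions.keys).any (fun ext => PySem.Str.endswith path ext)

-- ===== PORT B =====
-- the set literal {"java", …} of Source B (distinct literals, so it is its own PySem.Set)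
def extNames : List String :=
  ["java", "js", "php", "py", "vbs", "cpp", "c", "css", "html", "rb", "swift", "kt"]

-- Source B's backward for-loop: walk reversed(path) carrying the accumulator acc;
-- at the first '.' return the membership test, if the loop exhausts return True.
def bLoop : List Char → List Char → Bool
  | [], _ => true
  | c :: t, acc =>
      if c = '.' then decide (String.ofList acc ∈ extNames)
      else bLoop t (c :: acc)

def has_valid_extension_alt (path : String) : Bool :=
  bLoop path.toList.reverse []

-- ===== PRECONDITION & SPEC =====
def Spec_has_valid_extension (path : String) (out : Bool) : Prop := out = has_valid_extension_alt path
instance (path : String) (out : Bool) : Decidable (Spec_has_valid_extension path out) := by unfold Spec_has_valid_extension; infer_instance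

-- ===== CLAIM (what is proved, stated in full; the proofs are below) =====
def Claim_equal_has_valid_extension : Prop := ∀ (path : String), Dom_has_valid_extension path → Spec_has_valid_extension path (has_valid_extension path)

-- ===== LEMMAS AND PROOFS =====

-- the characters after the LAST '.' of l
def pvAfterLastDot (l : List Char) : List Char :=
  (l.reverse.takeWhile (fun c => decide (c ≠ '.'))).reverse

-- B's loop characterised: no dot left → true; otherwise membership of the leading
-- dot-free block (reversed back) prepended to the accumulator.
theorem bLoop_eq (r acc : List Char) :
    bLoop r acc = if '.' ∈ r then
        decide (String.ofList ((r.takeWhile (fun c => decide (c ≠ '.'))).reverse ++ acc) ∈ extNames)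
      else true := by
  induction r generalizing acc with
  | nil => simp [bLoop]
  | cons c t ih =>
    by_cases hc : c = '.'
    · subst hc; simp [bLoop]
    · have : ('.' ∈ c :: t) ↔ ('.' ∈ t) := by simp [Ne.symm hc]
      rw [bLoop, if_neg hc, ih (c :: acc)]
      by_cases ht : '.' ∈ t
      · simp [this, ht, hc]
      · simp [this, ht]

-- A dot-free block followed by '.' is a suffix-start of r iff it is exactly r's leading dot-free block.
theorem prefix_dot_iff_takeWhile (d r : List Char) (hd : '.' ∉ d) (hr : '.' ∈ r) :
    (d ++ ['.'] <+: r) ↔ r.takeWhile (fun c => decide (c ≠ '.')) = d := by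
  induction r generalizing d with
  | nil => cases hr
  | cons c t ih =>
    cases d with
    | nil =>
      simp only [List.nil_append]
      constructor
      · intro h
        obtain ⟨h1, -⟩ := List.cons_prefix_cons.mp h
        simp [← h1]
      · intro h
        by_cases hc : c = '.'
        · subst hc; exact List.cons_prefix_cons.mpr ⟨rfl, List.nil_prefix⟩
        · exfalso; simp [hc] at h
    | cons a d' =>
      have ha : a ≠ '.' := fun h => hd (by simp [h])
      have hd' : '.' ∉ d' := fun h => hd (by simp [h])
      by_cases hc : c = '.'
      · subst hc
        constructor
        · intro h
          rw [List.cons_append] at h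
          exact absurd (List.cons_prefix_cons.mp h).1 ha
        · intro h
          exfalso
          simp at h
      · have ht : '.' ∈ t := by
          rcases List.mem_cons.mp hr with h | h
          · exact absurd h.symm hc
          · exact h
        have hstep : (c :: t).takeWhile (fun x => decide (x ≠ '.')) =
            c :: t.takeWhile (fun x => decide (x ≠ '.')) := by
          simp [hc]
        constructor
        · intro h
          rw [List.cons_append] at h
          obtain ⟨h1, h2⟩ := List.cons_prefix_cons.mp h
          rw [hstep, (ih d' hd' ht).mp h2, h1]
        · intro h
          rw [hstep] at h
          obtain ⟨h1, h2⟩ := List.cons.inj h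
          rw [List.cons_append]
          exact List.cons_prefix_cons.mpr ⟨h1.symm, (ih d' hd' ht).mpr h2⟩

-- endswith '.'++e  ↔  the text after the last dot is exactly e (for dot-free e).
theorem endswith_key (l e : List Char) (he : '.' ∉ e) (hl : '.' ∈ l) :
    PySem.Chars.endswith l ('.' :: e) = true ↔ pvAfterLastDot l = e := by
  rw [PySem.Chars.endswith_iff, ← List.reverse_prefix]
  have : ('.' :: e).reverse = e.reverse ++ ['.'] := by simp
  rw [this, prefix_dot_iff_takeWhile e.reverse l.reverse (by simpa using he) (by simpa using hl)]
  unfold pvAfterLastDot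
  constructor
  · intro h; rw [h]; simp
  · intro h; rw [← h]; simp

-- One key of the table: A's endswith test for it equals B's "bare suffix is this name".
theorem key_case (l : List Char) (k : String) (e : List Char) (hk : k.toList = '.' :: e)
    (s : String) (hs : s.toList = e) (he : '.' ∉ e) (hl : '.' ∈ l) :
    (PySem.Chars.endswith l k.toList = true) ↔ (String.ofList (pvAfterLastDot l) = s) := by
  rw [hk, endswith_key l e he hl]
  constructor
  · intro h
    apply String.toList_inj.mp
    simp [h, hs]
  · intro h
    have := congrArg String.toList h
    simpa [hs] using this

-- ===== VERDICT (by name: the statement is the Claim_ definition above) =====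
theorem has_valid_extension_spec : Claim_equal_has_valid_extension := by
  intro path _
  unfold Spec_has_valid_extension has_valid_extension has_valid_extension_alt
  rw [bLoop_eq]
  by_cases hin : PySem.Str.isIn "." path = true
  · have hl : '.' ∈ path.toList := by
      have := (PySem.Str.isIn_iff_infix (sub := ".") (s := path)).mp hin
      simpa [List.singleton_infix_iff] using this
    have hlr : '.' ∈ path.toList.reverse := by simpa using hl
    have hsuffix : (path.toList.reverse.takeWhile (fun c => decide (c ≠ '.'))).reverse ++ ([] : List Char)
        = pvAfterLastDot path.toList := by simp [pvAfterLastDot]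
    rw [if_pos hlr, hsuffix]
    have hkeys : validExtensions.keys =
        [".java", ".js", ".php", ".py", ".vbs", ".cpp", ".c", ".css",
         ".html", ".rb", ".swift", ".kt"] := by decide
    rw [hkeys]
    simp only [hin, not_true_eq_false, if_false]
    rw [Bool.eq_iff_iff]
    simp only [List.any_cons, List.any_nil, Bool.or_eq_true, Bool.false_eq_true, or_false,
      decide_eq_true_eq, extNames, List.mem_cons, List.not_mem_nil, PySem.Str.endswith_eq]
    rw [key_case path.toList ".java" ['j','a','v','a'] rfl "java" rfl (by decide) hl,
        key_case path.toList ".js" ['j','s'] rfl "js" rfl (by decide) hl,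
        key_case path.toList ".php" ['p','h','p'] rfl "php" rfl (by decide) hl,
        key_case path.toList ".py" ['p','y'] rfl "py" rfl (by decide) hl,
        key_case path.toList ".vbs" ['v','b','s'] rfl "vbs" rfl (by decide) hl,
        key_case path.toList ".cpp" ['c','p','p'] rfl "cpp" rfl (by decide) hl,
        key_case path.toList ".c" ['c'] rfl "c" rfl (by decide) hl,
        key_case path.toList ".css" ['c','s','s'] rfl "css" rfl (by decide) hl,
        key_case path.toList ".html" ['h','t','m','l'] rfl "html" rfl (by decide) hl,
        key_case path.toList ".rb" ['r','b'] rfl "rb" rfl (by decide) hl,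
        key_case path.toList ".swift" ['s','w','i','f','t'] rfl "swift" rfl (by decide) hl,
        key_case path.toList ".kt" ['k','t'] rfl "kt" rfl (by decide) hl]
  · have h0 : PySem.Chars.isIn ['.'] path.toList = false := by simpa using hin
    have hnl : '.' ∉ path.toList := by
      intro h
      have : PySem.Chars.isIn ['.'] path.toList = true := by
        rw [PySem.Chars.isIn_iff_infix]
        simpa [List.singleton_infix_iff] using h
      simp [this] at h0
    have : '.' ∉ path.toList.reverse := by simpa using hnl
    simp [h0, this]
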